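-- pv_equiv track=rewrite | github.com/KR8ZYSHO3/smite-divine-arsenal | divine_arsenal/backend/tracker_realtime.py | _analyze_composition_type
-- ===== SOURCE A (Python) =====
-- from typing import Dict, List, Optional, Any
--
-- def _analyze_composition_type(gods: List[str]) -> str:
--     """Analyze enemy composition type."""
--     if not gods:
--         return "unknown"
--
--     # Count damage types
--     physical_count = 0
--     magical_count = 0
--     healing_count = 0
--
--     for god in gods:
--         god_lower = god.lower()
--
--         # Check for healing gods
--         if any(healer in god_lower for healer in ["aphrodite", "hel", "ra", "chang'e"]):
--             healing_count += 1
--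
--         # This is simplified - in a real implementation, you'd have a god database
--         # For now, we'll use a basic heuristic
--         if any(physical in god_lower for physical in ["hunter", "warrior", "assassin"]):
--             physical_count += 1
--         else:
--             magical_count += 1
--
--     # Determine composition type
--     if healing_count >= 2:
--         return "healing_comp"
--     elif physical_count >= 3:
--         return "heavy_physical"
--     elif magical_count >= 3:
--         return "heavy_magical"
--     else:
--         return "balanced"
-- ===== SOURCE B (Python) =====
-- def _analyze_composition_type(gods):
--     """Analyze enemy composition type."""
--     if not gods:
--         return "unknown"
--
--     lowered = [g.lower() for g in gods]
--     PHYSICAL = ["hunter", "warrior", "assassin"]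
--
--     # data-driven rule table: first rule whose match count meets its threshold wins
--     rules = [
--         (lambda s: any(h in s for h in ["aphrodite", "hel", "ra", "chang'e"]), 2, "healing_comp"),
--         (lambda s: any(p in s for p in PHYSICAL), 3, "heavy_physical"),
--         (lambda s: not any(p in s for p in PHYSICAL), 3, "heavy_magical"),
--     ]
--     for pred, threshold, label in rules:
--         if sum(map(pred, lowered)) >= threshold:
--             return label
--     return "balanced"
-- ===== Notes on version B (the rewrite author's own statement) =====
-- stated objective: alternative
-- what changed: Replaces the single loop maintaining three mutable counters plus a hard-coded if/elif cascade by a data-driven rule table (predicate, threshold, label) scanned for the first satisfied rule, with the names lowered once up front.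
import Mathlib
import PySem

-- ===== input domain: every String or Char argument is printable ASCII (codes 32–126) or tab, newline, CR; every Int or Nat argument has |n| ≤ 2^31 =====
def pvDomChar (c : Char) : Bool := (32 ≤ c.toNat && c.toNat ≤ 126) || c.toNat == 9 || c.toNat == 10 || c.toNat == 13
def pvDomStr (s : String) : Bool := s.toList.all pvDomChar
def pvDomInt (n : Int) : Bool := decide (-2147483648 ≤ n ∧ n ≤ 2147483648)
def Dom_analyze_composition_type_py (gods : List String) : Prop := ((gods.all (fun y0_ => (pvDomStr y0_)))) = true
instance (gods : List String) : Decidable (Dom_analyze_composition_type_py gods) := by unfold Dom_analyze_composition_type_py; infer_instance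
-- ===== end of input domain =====

-- B replaces A's single counting loop (three mutable counters, hard-coded cascade) by a
-- data-driven rule table scanned for the first satisfied (predicate, threshold, label) rule;
-- objective: alternative decomposition, same cost.

-- ===== PORT A =====
-- any(healer in god_lower for healer in ["aphrodite", "hel", "ra", "chang'e"])
def pvIsHealer (gl : String) : Bool :=
  ["aphrodite", "hel", "ra", "chang'e"].any (fun h => PySem.Str.isIn h gl)

-- any(physical in god_lower for physical in ["hunter", "warrior", "assassin"])
def pvIsPhysical (gl : String) : Bool :=
  ["hunter", "warrior", "assassin"].any (fun p => PySem.Str.isIn p gl)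

def analyze_composition_type_py (gods : List String) : String :=
  if gods = [] then "unknown"
  else
    -- the for-loop over gods, carrying (physical_count, magical_count, healing_count)
    let counts : Nat × Nat × Nat :=
      gods.foldl (fun (acc : Nat × Nat × Nat) god =>
        let god_lower := PySem.Str.lower god
        let acc := if pvIsHealer god_lower then (acc.1, acc.2.1, acc.2.2 + 1) else acc
        if pvIsPhysical god_lower then (acc.1 + 1, acc.2.1, acc.2.2)
        else (acc.1, acc.2.1 + 1, acc.2.2)) (0, 0, 0)
    if counts.2.2 ≥ 2 then "healing_comp"
    else if counts.1 ≥ 3 then "heavy_physical"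
    else if counts.2.1 ≥ 3 then "heavy_magical"
    else "balanced"

-- ===== PORT B =====
-- B's rule table: (predicate on a lowered name, threshold, label)
def pvRules : List ((String → Bool) × Nat × String) :=
  [ (pvIsHealer, 2, "healing_comp"),
    (pvIsPhysical, 3, "heavy_physical"),
    (fun s => !(pvIsPhysical s), 3, "heavy_magical") ]

-- the 'for pred, threshold, label in rules' loop with its early returns
def pvApplyRules (lowered : List String) : List ((String → Bool) × Nat × String) → String
  | [] => "balanced"
  | (pred, threshold, label) :: rest =>
    if lowered.countP pred ≥ threshold then label else pvApplyRules lowered rest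

def analyze_composition_type_py_alt (gods : List String) : String :=
  if gods = [] then "unknown"
  else
    let lowered := gods.map PySem.Str.lower
    pvApplyRules lowered pvRules

-- ===== PRECONDITION & SPEC =====
def Spec_analyze_composition_type_py (gods : List String) (out : String) : Prop := out = analyze_composition_type_py_alt gods
instance (gods : List String) (out : String) : Decidable (Spec_analyze_composition_type_py gods out) := by unfold Spec_analyze_composition_type_py; infer_instance

-- ===== CLAIM (what is proved, stated in full; the proofs are below) =====
def Claim_equal_analyze_composition_type_py : Prop := ∀ (gods : List String), Dom_analyze_composition_type_py gods → Spec_analyze_composition_type_py gods (analyze_composition_type_py gods)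

-- ===== LEMMAS AND PROOFS =====

-- loop invariant: A's fold computes the countP's, magical = processed length - physical
theorem pv_fold_counts (gods : List String) (a b c : Nat) :
    gods.foldl (fun (acc : Nat × Nat × Nat) god =>
        let god_lower := PySem.Str.lower god
        let acc := if pvIsHealer god_lower then (acc.1, acc.2.1, acc.2.2 + 1) else acc
        if pvIsPhysical god_lower then (acc.1 + 1, acc.2.1, acc.2.2)
        else (acc.1, acc.2.1 + 1, acc.2.2)) (a, b, c)
      = (a + gods.countP (fun g => pvIsPhysical (PySem.Str.lower g)),
         b + (gods.length - gods.countP (fun g => pvIsPhysical (PySem.Str.lower g))),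
         c + gods.countP (fun g => pvIsHealer (PySem.Str.lower g))) := by
  induction gods generalizing a b c with
  | nil => simp
  | cons g gs ih =>
    have hle : gs.countP (fun g => pvIsPhysical (PySem.Str.lower g)) ≤ gs.length :=
      List.countP_le_length
    simp only [List.foldl_cons, List.countP_cons, List.length_cons]
    by_cases hh : pvIsHealer (PySem.Str.lower g) <;>
      by_cases hp : pvIsPhysical (PySem.Str.lower g) <;>
        simp [hh, hp, ih] <;> omega

-- counting the complement predicate is length minus the count
theorem pv_countP_not (l : List String) (p : String → Bool) :
    l.countP (fun s => !(p s)) = l.length - l.countP p := by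
  induction l with
  | nil => simp
  | cons x xs ih =>
    have hle : xs.countP p ≤ xs.length := List.countP_le_length
    by_cases h : p x <;> simp [List.countP_cons, h, ih] <;> omega

theorem analyze_composition_type_py_eq (gods : List String) :
    analyze_composition_type_py gods = analyze_composition_type_py_alt gods := by
  unfold analyze_composition_type_py analyze_composition_type_py_alt pvRules
  by_cases h : gods = []
  · simp [h]
  · simp only [h, if_false, pv_fold_counts, Nat.zero_add, pvApplyRules,
      List.countP_map, Function.comp_def, pv_countP_not, List.length_map]

-- ===== VERDICT (by name: the statement is the Claim_ definition above) =====
theorem analyze_composition_type_py_spec : Claim_equal_analyze_composition_type_py := by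
  intro gods _
  exact analyze_composition_type_py_eq gods
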